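-- pv_equiv track=rewrite | github.com/seong-wooo/Algorithm_Study | 프로그래머스/2/64065. 튜플/튜플.py | solution
-- ===== SOURCE A (Python) =====
-- def solution(s):
--     s = list(map(lambda x :  list(map(int, x.split(","))), s.replace("{{", "").replace("}}", "").split("},{")))
--
--     s.sort(key = lambda x : len(x))
--
--     result = set(s[0])
--     answer = s[0]
--
--     for p in s:
--         add = set(p) - result
--         result.update(add)
--         for a in add:
--             answer.append(a)
--
--     return answer
-- ===== SOURCE B (Python) =====
-- def solution(s):
--     subsets = list(map(lambda x: list(map(int, x.split(","))),
--                        s.replace("{{", "").replace("}}", "").split("},{")))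
--     flat = [e for p in subsets for e in p]
--     count = {}
--     for e in flat:
--         count[e] = count.get(e, 0) + 1
--     return sorted(count, key=lambda e: -count[e])
-- ===== Notes on version B (the rewrite author's own statement) =====
-- stated objective: simpler
-- what changed: Replaces A's sort-subsets-by-size greedy accumulation with a running set difference by flattening all subsets, counting occurrences in a frequency table, and sorting the distinct elements by descending count.
-- outside the precondition, e.g. on solution('{{1,1},{1,2}}'): A returns [1, 1, 2], B returns [1, 2]; on solution('{{2,1}}'): A returns [2, 1], B returns [2, 1]; on solution('{{1},{2}}'): A returns [1, 2], B returns [1, 2]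
import Mathlib
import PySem

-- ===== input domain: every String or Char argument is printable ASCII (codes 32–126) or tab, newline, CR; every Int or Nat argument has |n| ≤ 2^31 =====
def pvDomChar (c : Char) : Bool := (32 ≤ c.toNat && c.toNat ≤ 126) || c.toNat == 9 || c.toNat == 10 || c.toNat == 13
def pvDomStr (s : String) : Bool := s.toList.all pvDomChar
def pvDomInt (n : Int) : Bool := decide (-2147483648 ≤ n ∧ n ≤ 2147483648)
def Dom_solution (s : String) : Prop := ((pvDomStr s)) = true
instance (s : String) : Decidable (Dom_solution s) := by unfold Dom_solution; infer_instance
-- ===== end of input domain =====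

-- B replaces A's sort-by-size greedy set-difference accumulation by flattening the subsets,
-- counting how often each element occurs, and sorting the distinct elements by descending count (simpler).

-- Both Pythons parse with the very same line
-- list(map(lambda x: list(map(int, x.split(","))), s.replace("{{","").replace("}}","").split("},{")));
-- it is ported once here and used by both ports (int() raising ValueError = the mapM returning none).
def pvParse (s : String) : Option (List (List Int)) :=
  (((PySem.Str.split? (PySem.Str.replace (PySem.Str.replace s "{{" "") "}}" "") "},{").getD []).mapM
    (fun x => ((PySem.Str.split? x ",").getD []).mapM PySem.Int.ofStr?))

-- ===== PORT A =====
-- loop body: add = set(p) - result; result.update(add); for a in add: answer.append(a)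
-- (`for a in add` iterates a Python set, whose order is implementation-defined; Pre_solution
--  keeps `add` to at most one element, where the order is irrelevant)
def pvStepA (st : PySem.Set Int × List Int) (p : List Int) : PySem.Set Int × List Int :=
  let add := PySem.Set.diff (PySem.Set.ofList p) st.1
  (PySem.Set.update st.1 add, st.2 ++ add)

def solution (s : String) : List Int :=
  match pvParse s with
  | none => []        -- int(...) raised ValueError: excluded by Pre_solution
  | some L =>
    let q := PySem.List.sorted L (fun x => (x.length : Int))
    match q with
    | [] => []        -- unreachable: str.split never returns an empty list
    | p0 :: _ => (q.foldl pvStepA (PySem.Set.ofList p0, p0)).2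

-- ===== PORT B =====
def solution_alt (s : String) : List Int :=
  match pvParse s with
  | none => []
  | some subsets =>
    -- flat = [e for p in subsets for e in p]
    let flat := subsets.flatMap id
    -- for e in flat: count[e] = count.get(e, 0) + 1
    let count := flat.foldl (fun d e => d.insert e (d.getD e 0 + 1))
      (PySem.Dict.empty : PySem.Dict Int Int)
    PySem.List.sorted count.keys (fun e => -(count.getD e 0))

-- ===== PRECONDITION & SPEC =====
-- Pre_solution excludes inputs where int() raises ValueError, and the parseable inputs that are
-- not a valid tuple encoding (duplicate-free subsets whose size-sorted sets start from a singleton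
-- and grow by at most one element each): there the order A returns is an accident of its first
-- subset's raw list order and of Python's set-iteration order, which no program should be held to.
def pvShape_solution (q : List (List Int)) : Prop :=
  q ≠ [] ∧ (q.headI).length = 1 ∧
  List.IsChain (fun x y => x.toFinset ⊆ y.toFinset ∧ y.length ≤ x.length + 1) q

def Pre_solution (s : String) : Prop :=
  pvParse s ≠ none ∧
  (∀ l ∈ (pvParse s).getD [], l.Nodup) ∧
  pvShape_solution (PySem.List.sorted ((pvParse s).getD []) (fun x => (x.length : Int)))

instance (s : String) : Decidable (Pre_solution s) := by
  unfold Pre_solution pvShape_solution; infer_instance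

def pvWitness_solution : String := "{{2},{2,1},{2,1,3}}"

def Spec_solution (s : String) (out : List Int) : Prop := out = solution_alt s
instance (s : String) (out : List Int) : Decidable (Spec_solution s out) := by unfold Spec_solution; infer_instance

-- ===== CLAIM (what is proved, stated in full; the proofs are below) =====
def Claim_equal_solution : Prop := ∀ (s : String), Dom_solution s → Pre_solution s → Spec_solution s (solution s)

-- ===== LEMMAS AND PROOFS =====

-- number of subsets of qs containing e
def pvCnt (qs : List (List Int)) (e : Int) : Nat := qs.countP (fun p => decide (e ∈ p))

lemma pvLoop (qs : List (List Int)) (prev : List Int) (done : List (List Int)) (a : List Int)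
    (hch : List.IsChain (fun x y => x.toFinset ⊆ y.toFinset ∧ y.length ≤ x.length + 1) (prev :: qs))
    (hnd : ∀ l ∈ qs, l.Nodup) (hpnd : prev.Nodup)
    (hand : a.Nodup)
    (hmem : ∀ e, e ∈ a ↔ e ∈ prev)
    (hdone : ∀ d ∈ done, ∀ e, e ∈ d → e ∈ prev)
    (hprevdone : prev ∈ done)
    (hpw : a.Pairwise (fun x y => pvCnt done y < pvCnt done x)) :
    ∃ b : List Int,
      qs.foldl pvStepA (a, a) = (b, b) ∧ b.Nodup ∧
      (∀ e, e ∈ b ↔ e ∈ a ∨ ∃ p ∈ qs, e ∈ p) ∧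
      b.Pairwise (fun x y => pvCnt (done ++ qs) y < pvCnt (done ++ qs) x) := by
  induction qs generalizing prev done a with
  | nil =>
    refine ⟨a, rfl, hand, by simp, by simpa using hpw⟩
  | cons p qs ih =>
    rw [List.isChain_cons_cons] at hch
    obtain ⟨⟨hsub, hlen⟩, hch'⟩ := hch
    have hpd : p.Nodup := hnd p (by simp)
    have haddmem : ∀ x, x ∈ PySem.Set.diff (PySem.Set.ofList p) a ↔ x ∈ p ∧ x ∉ a := by
      intro x
      rw [PySem.Set.mem_diff, PySem.Set.mem_ofList]
    have haddnd : (PySem.Set.diff (PySem.Set.ofList p) a).Nodup :=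
      PySem.Set.nodup_diff _ _ (PySem.Set.nodup_ofList p)
    have hdisj : ∀ x ∈ PySem.Set.diff (PySem.Set.ofList p) a, x ∉ a :=
      fun x hx => ((haddmem x).mp hx).2
    set add := PySem.Set.diff (PySem.Set.ofList p) a with hadddef
    have hstep : pvStepA (a, a) p = (a ++ add, a ++ add) := by
      show ((PySem.Set.update a (PySem.Set.diff (PySem.Set.ofList p) a)),
        a ++ PySem.Set.diff (PySem.Set.ofList p) a) = _
      rw [← hadddef, PySem.Set.update_eq_append_of_disjoint _ _ haddnd hdisj]
    have hprevp : ∀ e ∈ prev, e ∈ p := fun e he =>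
      List.mem_toFinset.mp (hsub (List.mem_toFinset.mpr he))
    have hap : ∀ e ∈ a, e ∈ p := fun e he => hprevp e ((hmem e).mp he)
    have hand' : (a ++ add).Nodup :=
      List.Nodup.append hand haddnd (fun x hx hx2 => (hdisj x hx2) hx)
    have hmem' : ∀ e, e ∈ a ++ add ↔ e ∈ p := by
      intro e; rw [List.mem_append, haddmem e]
      constructor
      · rintro (h | h)
        exacts [hap e h, h.1]
      · intro h
        by_cases ha : e ∈ a
        · exact Or.inl ha
        · exact Or.inr ⟨h, ha⟩
    have hdone' : ∀ d ∈ done ++ [p], ∀ e, e ∈ d → e ∈ p := by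
      intro d hd e he
      rcases List.mem_append.mp hd with h | h
      · exact hprevp e (hdone d h e he)
      · rw [List.mem_singleton] at h; subst h; exact he
    have hcnt_cons : ∀ x, pvCnt (done ++ [p]) x = pvCnt done x + (if x ∈ p then 1 else 0) := by
      intro x
      simp only [pvCnt, List.countP_append, List.countP_cons, List.countP_nil]
      by_cases h : x ∈ p <;> simp [h]
    have hlen_add : add.length ≤ 1 := by
      have h1 : add.toFinset = p.toFinset \ a.toFinset := by
        ext x; simp only [List.mem_toFinset, Finset.mem_sdiff, haddmem x]
      have h2 : a.toFinset = prev.toFinset := by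
        ext x; simp only [List.mem_toFinset, hmem x]
      have h3 : add.toFinset.card = add.length := List.toFinset_card_of_nodup haddnd
      have h4 : prev.toFinset.card = prev.length := List.toFinset_card_of_nodup hpnd
      have h5 : p.toFinset.card = p.length := List.toFinset_card_of_nodup hpd
      have hsub2 : a.toFinset ⊆ p.toFinset := by rw [h2]; exact hsub
      have h6 : (p.toFinset \ a.toFinset).card = p.toFinset.card - a.toFinset.card := by
        rw [Finset.card_sdiff, Finset.inter_eq_left.mpr hsub2]
      rw [← h1] at h6
      have h7 : a.toFinset.card = prev.toFinset.card := by rw [h2]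
      omega
    have hpw' : (a ++ add).Pairwise
        (fun x y => pvCnt (done ++ [p]) y < pvCnt (done ++ [p]) x) := by
      rw [List.pairwise_append]
      refine ⟨?_, ?_, ?_⟩
      · refine hpw.imp_of_mem (fun {x y} hx hy hlt => ?_)
        rw [hcnt_cons x, hcnt_cons y, if_pos (hap x hx), if_pos (hap y hy)]
        omega
      · match add, hlen_add with
        | [], _ => exact List.Pairwise.nil
        | [x], _ => exact List.pairwise_singleton _ x
      · intro x hx y hy
        have hxa : 0 < pvCnt done x := by
          rw [pvCnt, List.countP_pos_iff]
          exact ⟨prev, hprevdone, by simpa using (hmem x).mp hx⟩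
        have hy0 : pvCnt done y = 0 := by
          have hyp : y ∉ prev := fun hc => ((haddmem y).mp hy).2 ((hmem y).mpr hc)
          refine List.countP_eq_zero.mpr ?_
          intro d hd
          simpa using fun hyd => hyp (hdone d hd y hyd)
        rw [hcnt_cons x, hcnt_cons y, if_pos (hap x hx), if_pos (((haddmem y).mp hy).1), hy0]
        omega
    obtain ⟨b, hb1, hb2, hb3, hb4⟩ :=
      ih p (done ++ [p]) (a ++ add) hch'
        (fun l hl => hnd l (by simp [hl])) hpd hand' hmem' hdone' (by simp) hpw'
    refine ⟨b, ?_, hb2, ?_, ?_⟩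
    · rw [List.foldl_cons, hstep, hb1]
    · intro e
      rw [hb3 e, List.mem_append, haddmem e]
      constructor
      · rintro ((h | h) | ⟨q, hq, hh⟩)
        · exact Or.inl h
        · exact Or.inr ⟨p, by simp, h.1⟩
        · exact Or.inr ⟨q, by simp [hq], hh⟩
      · rintro (h | ⟨q, hq, hh⟩)
        · exact Or.inl (Or.inl h)
        · rcases List.mem_cons.mp hq with rfl | hq'
          · by_cases ha : e ∈ a
            · exact Or.inl (Or.inl ha)
            · exact Or.inl (Or.inr ⟨hh, ha⟩)
          · exact Or.inr ⟨q, hq', hh⟩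
    · simpa [List.append_assoc] using hb4

-- in a list of duplicate-free subsets, the flattening counts each element once per subset
lemma pvFlatCount (L : List (List Int)) (hnd : ∀ l ∈ L, l.Nodup) (e : Int) :
    (L.flatMap id).count e = pvCnt L e := by
  induction L with
  | nil => simp [pvCnt]
  | cons p L ih =>
    have hp : p.count e = if e ∈ p then 1 else 0 := by
      split_ifs with h
      · exact List.count_eq_one_of_mem (hnd p (by simp)) h
      · exact List.count_eq_zero.mpr h
    have hcc : pvCnt (p :: L) e = pvCnt L e + (if e ∈ p then 1 else 0) := by
      simp only [pvCnt, List.countP_cons]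
      by_cases h : e ∈ p <;> simp [h]
    simp only [List.flatMap_cons, id_eq, List.count_append]
    rw [ih (fun l hl => hnd l (by simp [hl])), hp, hcc]
    omega

-- ===== VERDICT (by name: the statement is the Claim_ definition above) =====
theorem solution_spec : Claim_equal_solution := by
  intro s _hdom hpre
  obtain ⟨hne, hnodup, hshape⟩ := hpre
  unfold Spec_solution
  cases hL : pvParse s with
  | none => exact absurd hL hne
  | some L =>
    rw [hL] at hnodup hshape
    simp only [Option.getD_some] at hnodup hshape
    obtain ⟨hqne, hhead, hchain⟩ := hshape
    unfold solution solution_alt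
    rw [hL]
    simp only []
    cases hq : PySem.List.sorted L (fun x => ((x.length : Int))) with
    | nil => exact absurd hq hqne
    | cons p0 rest =>
      rw [hq] at hhead hchain
      simp only [List.headI] at hhead
      obtain ⟨e0, rfl⟩ := List.length_eq_one_iff.mp hhead
      have hqnd : ∀ l ∈ [e0] :: rest, l.Nodup := by
        intro l hl
        exact hnodup l ((PySem.List.mem_sorted L _ false l).mp (hq ▸ hl))
      have hofl : PySem.Set.ofList [e0] = [e0] :=
        PySem.Set.ofList_eq_self_of_nodup _ (List.nodup_singleton e0)
      have hdiff0 : PySem.Set.diff (PySem.Set.ofList [e0]) [e0] = [] := by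
        refine List.eq_nil_iff_forall_not_mem.mpr (fun x hx => ?_)
        have := (PySem.Set.mem_diff _ _ x).mp hx
        exact this.2 ((PySem.Set.mem_ofList _ x).mp this.1)
      have hstep0 : pvStepA ([e0], [e0]) [e0] = ([e0], [e0]) := by
        show (PySem.Set.update [e0] (PySem.Set.diff (PySem.Set.ofList [e0]) [e0]),
          [e0] ++ PySem.Set.diff (PySem.Set.ofList [e0]) [e0]) = _
        rw [hdiff0]
        rfl
      obtain ⟨b, hb1, hb2, hb3, hb4⟩ :=
        pvLoop rest [e0] [[e0]] [e0]
          hchain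
          (fun l hl => hqnd l (by simp [hl])) (List.nodup_singleton e0)
          (List.nodup_singleton e0) (fun e => Iff.rfl)
          (by intro d hd e he; rw [List.mem_singleton] at hd; subst hd; exact he)
          (by simp) (List.pairwise_singleton _ _)
      have hAres : (List.foldl pvStepA (PySem.Set.ofList [e0], [e0]) ([e0] :: rest)).2 = b := by
        rw [hofl, List.foldl_cons, hstep0, hb1]
      have hperm : ([e0] :: rest).Perm L := hq ▸ PySem.List.sorted_perm L _ false
      have hcntLq : ∀ e, pvCnt L e = pvCnt ([e0] :: rest) e :=
        fun e => (List.Perm.countP_eq _ hperm).symm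
      set flat := L.flatMap id with hfdef
      have hcounter :
          flat.foldl (fun d e => d.insert e (d.getD e 0 + 1))
              (PySem.Dict.empty : PySem.Dict Int Int)
            = PySem.Dict.counter flat :=
        PySem.Dict.foldl_insert_getD_add_one_eq_counter flat
      set counts := flat.foldl (fun d e => d.insert e (d.getD e 0 + 1))
          (PySem.Dict.empty : PySem.Dict Int Int)
        with hcdef
      have hkey : (fun e => -(counts.getD e 0)) = (fun e => -((pvCnt ([e0] :: rest) e : Int))) := by
        funext e
        rw [hcounter, PySem.Dict.getD_counter, pvFlatCount L hnodup e, hcntLq e]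
      have hkeys : counts.keys = PySem.Set.ofList flat := by
        rw [hcounter, PySem.Dict.keys_counter]
      have hkeysmem : ∀ e, e ∈ counts.keys ↔ ∃ p ∈ L, e ∈ p := by
        intro e
        rw [hkeys, PySem.Set.mem_ofList, hfdef, List.mem_flatMap]
        simp [id]
      have hkeysnd : counts.keys.Nodup := by
        rw [hkeys]; exact PySem.Set.nodup_ofList flat
      have he0L : [e0] ∈ L := hperm.mem_iff.mp (by simp)
      have hbperm : b.Perm counts.keys := by
        rw [List.perm_ext_iff_of_nodup hb2 hkeysnd]
        intro e
        rw [hb3 e, hkeysmem e]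
        constructor
        · rintro (h | ⟨p, hp, hh⟩)
          · exact ⟨[e0], he0L, by simpa using h⟩
          · exact ⟨p, hperm.mem_iff.mp (by simp [hp]), hh⟩
        · rintro ⟨p, hp, hh⟩
          rcases List.mem_cons.mp (hperm.mem_iff.mpr hp) with rfl | h
          · exact Or.inl hh
          · exact Or.inr ⟨p, h, hh⟩
      have hb4' : b.Pairwise
          (fun x y => pvCnt ([e0] :: rest) y < pvCnt ([e0] :: rest) x) := by
        simpa using hb4
      have hbpw : b.Pairwise
          (fun x y => -(counts.getD x 0) < -(counts.getD y 0)) := by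
        refine hb4'.imp ?_
        intro x y h
        have hx := congrFun hkey x
        have hy := congrFun hkey y
        simp only at hx hy
        omega
      show (List.foldl pvStepA (PySem.Set.ofList [e0], [e0]) ([e0] :: rest)).2
        = PySem.List.sorted counts.keys fun e => -counts.getD e 0
      rw [hAres, PySem.List.sorted_eq_of_perm_of_pairwise_lt counts.keys b _ hbperm hbpw]
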